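-- pv_equiv track=rewrite | github.com/travisCxy/deblur | word/word_ocr.py | ignore_hw
-- ===== SOURCE A (Python) =====
-- def ignore_hw(s):
--     ret = ""
--     ignore = False
--     for ind, c in enumerate(s):
--         if c == '$':
--             if ind - 1 < 0 or s[ind - 1] != '\\':
--                 ignore = not ignore
--                 continue
--             else:
--                 if not ignore:
--                     ret += c
--         else:
--             if not ignore:
--                 ret += c
--     return ret
-- ===== SOURCE B (Python) =====
-- def ignore_hw(s):
--     # Split at every '$', then re-join the splits whose preceding '$' was
--     # escaped (previous char '\'); even-indexed segments are the kept regions.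
--     parts = s.split('$')
--     segments = [parts[0]]
--     for p in parts[1:]:
--         if segments[-1].endswith('\\'):
--             segments[-1] += '$' + p
--         else:
--             segments.append(p)
--     return ''.join(segments[::2])
-- ===== Notes on version B (the rewrite author's own statement) =====
-- stated objective: faster
-- what changed: Replaces the char-by-char toggle scan (enumerate + flag + previous-char indexing) by split-on-'$' / re-merge escaped splits / join the even-indexed segments, moving the per-character work into C-level str.split/join.
import Mathlib
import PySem

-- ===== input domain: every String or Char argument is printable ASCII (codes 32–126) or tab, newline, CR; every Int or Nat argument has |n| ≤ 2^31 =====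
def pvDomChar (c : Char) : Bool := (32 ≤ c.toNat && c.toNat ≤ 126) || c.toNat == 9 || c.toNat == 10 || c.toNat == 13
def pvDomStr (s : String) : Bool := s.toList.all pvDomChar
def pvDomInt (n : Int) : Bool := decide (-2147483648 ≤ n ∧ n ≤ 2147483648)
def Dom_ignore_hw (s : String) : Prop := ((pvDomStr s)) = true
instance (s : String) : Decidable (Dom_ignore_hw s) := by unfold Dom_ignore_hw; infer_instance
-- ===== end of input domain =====

-- B filters the '$'-toggled regions by splitting on '$' and joining the even segments
-- (re-merging escaped splits) instead of A's char-by-char flag loop (objective: faster, measured constant-factor).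

-- ===== PORT A =====
-- the loop body of A (one iteration of 'for ind, c in enumerate(s)')
def pvStepA (s : String) : List Char × Bool → Int × Char → List Char × Bool
  | (ret, ignore), (ind, c) =>
    if c = '$' then
      if ind - 1 < 0 ∨ PySem.Str.pyGet? s (ind - 1) ≠ some '\\' then
        (ret, !ignore)                                 -- toggle ignore; continue
      else
        if !ignore then (ret ++ [c], ignore) else (ret, ignore)   -- escaped '$': ret += c
    else
      if !ignore then (ret ++ [c], ignore) else (ret, ignore)     -- ret += c

def ignore_hw (s : String) : String :=
  String.ofList ((PySem.List.enumerate s.toList).foldl (pvStepA s) ([], false)).1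

-- ===== PORT B =====
-- body of B's merge loop: append p as a new segment, or re-join it when the
-- preceding '$' was escaped (segments kept in reverse order, 'segments[-1]' is the head)
def pvMergeStep (segs : List (List Char)) (p : List Char) : List (List Char) :=
  match segs with
  | [] => [p]
  | h :: t => if PySem.Chars.endswith h ['\\'] then (h ++ '$' :: p) :: t else p :: h :: t

-- hand port of the slice segments[::2] (every second element from index 0); exact for a step of 2
def pvEvens : List (List Char) → List (List Char)
  | [] => []
  | [a] => [a]
  | a :: _ :: r => a :: pvEvens r

def ignore_hw_alt (s : String) : String :=
  match List.splitOn '$' s.toList with          -- s.split('$')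
  | [] => ""                                    -- unreachable: split never returns an empty list
  | p0 :: rest =>
    let segments := (rest.foldl pvMergeStep [p0]).reverse
    String.ofList (PySem.Chars.join [] (pvEvens segments))   -- ''.join(segments[::2])

-- ===== PRECONDITION & SPEC =====
def Spec_ignore_hw (s : String) (out : String) : Prop := out = ignore_hw_alt s
instance (s : String) (out : String) : Decidable (Spec_ignore_hw s out) := by unfold Spec_ignore_hw; infer_instance

-- ===== CLAIM (what is proved, stated in full; the proofs are below) =====
def Claim_equal_ignore_hw : Prop := ∀ (s : String), Dom_ignore_hw s → Spec_ignore_hw s (ignore_hw s)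

-- ===== LEMMAS AND PROOFS =====

-- reference segmentation: split at every unescaped '$' (esc = previous char was '\')
def pvSegs : Bool → List Char → List (List Char)
  | _, [] => [[]]
  | esc, c :: cs =>
    if c = '$' ∧ esc = false then [] :: pvSegs false cs
    else List.modifyHead (List.cons c) (pvSegs (c == '\\') cs)

-- reference form of A's loop: esc = previous char was '\', ign = current ignore flag
def pvGoA : Bool → Bool → List Char → List Char
  | _, _, [] => []
  | esc, ign, c :: cs =>
    if c = '$' ∧ esc = false then pvGoA false (!ign) cs
    else if ign then pvGoA (c == '\\') ign cs else c :: pvGoA (c == '\\') ign cs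

-- keep every second segment, starting with (resp. skipping) the first
def pvSel : Bool → List (List Char) → List Char
  | _, [] => []
  | ign, p :: ps => (if ign then [] else p) ++ pvSel (!ign) ps

theorem pvSegs_ne_nil (esc : Bool) (l : List Char) : pvSegs esc l ≠ [] := by
  induction l generalizing esc with
  | nil => simp [pvSegs]
  | cons c cs ih =>
    simp only [pvSegs]
    split
    · simp
    · cases h : pvSegs (c == '\\') cs with
      | nil => exact absurd h (ih _)
      | cons p ps => simp [List.modifyHead]

theorem pvSplitOn_nil : List.splitOn '$' ([] : List Char) = [[]] := rfl

theorem pvSplitOn_cons_pos (cs : List Char) :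
    List.splitOn '$' ('$' :: cs) = [] :: List.splitOn '$' cs := by
  unfold List.splitOn
  rw [List.splitOnP_cons]
  simp

theorem pvSplitOn_cons_neg {c : Char} (h : c ≠ '$') (cs : List Char) :
    List.splitOn '$' (c :: cs) = List.modifyHead (List.cons c) (List.splitOn '$' cs) := by
  unfold List.splitOn
  rw [List.splitOnP_cons]
  simp [h]

theorem pvEndswith_nil : PySem.Chars.endswith ([] : List Char) ['\\'] = false := by decide

theorem pvEndswith_concat (cur : List Char) (c : Char) :
    PySem.Chars.endswith (cur ++ [c]) ['\\'] = (c == '\\') := by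
  by_cases h : c = '\\'
  · subst h
    simp [PySem.Chars.endswith_iff]
  · have hb : (c == '\\') = false := by simp [h]
    rw [hb, Bool.eq_false_iff]
    intro hsuf
    rw [PySem.Chars.endswith_iff] at hsuf
    obtain ⟨t, ht⟩ := hsuf
    have := (List.append_inj' ht (by simp)).2
    simp at this
    exact h this.symm

theorem pvJoin_nil_cons (x : List Char) (xs : List (List Char)) :
    PySem.Chars.join [] (x :: xs) = x ++ PySem.Chars.join [] xs := by
  cases xs with
  | nil => simp [PySem.Chars.join_singleton, PySem.Chars.join_nil]
  | cons y ys => rw [PySem.Chars.join_cons_cons]; simp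

theorem pvSel_evens (ps : List (List Char)) :
    PySem.Chars.join [] (pvEvens ps) = pvSel false ps := by
  induction ps using pvEvens.induct with
  | case1 => simp [pvEvens, pvSel, PySem.Chars.join_nil]
  | case2 a => simp [pvEvens, pvSel, PySem.Chars.join_singleton]
  | case3 a b r ih => rw [pvEvens, pvJoin_nil_cons, ih]; simp [pvSel]

theorem pvGoA_sel (l : List Char) : ∀ (esc ign : Bool),
    pvGoA esc ign l = pvSel ign (pvSegs esc l) := by
  induction l with
  | nil => intro esc ign; cases ign <;> rfl
  | cons c cs ih =>
    intro esc ign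
    by_cases h : c = '$' ∧ esc = false
    · simp only [pvGoA, pvSegs, if_pos h, pvSel, ih]
      cases ign <;> simp
    · simp only [pvGoA, pvSegs, if_neg h]
      cases hs : pvSegs (c == '\\') cs with
      | nil => exact absurd hs (pvSegs_ne_nil _ _)
      | cons p ps =>
        have := ih (c == '\\') ign
        rw [hs] at this
        cases ign <;> simp_all [pvSel, List.modifyHead]

-- B's merge loop over the '$'-splits rebuilds (reversed) the unescaped-'$' segmentation
theorem pvMain (l : List Char) : ∀ (cur : List Char) (done : List (List Char)),
    (List.splitOn '$' l).tail.foldl pvMergeStep ((cur ++ (List.splitOn '$' l).headI) :: done)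
      = (List.modifyHead (cur ++ ·) (pvSegs (PySem.Chars.endswith cur ['\\']) l)).reverse ++ done := by
  induction l with
  | nil =>
    intro cur done
    rw [pvSplitOn_nil]
    rfl
  | cons c cs ih =>
    intro cur done
    cases hq : List.splitOn '$' cs with
    | nil => exact absurd hq (by unfold List.splitOn; exact List.splitOnP_ne_nil _ _)
    | cons q0 qrest =>
      by_cases hc : c = '$'
      · subst hc
        rw [pvSplitOn_cons_pos, hq]
        simp only [List.tail_cons, List.headI_cons, List.foldl_cons, List.append_nil]
        by_cases he : PySem.Chars.endswith cur ['\\'] = true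
        · -- escaped split: re-join with '$'
          have hms : pvMergeStep (cur :: done) q0 = ((cur ++ ['$']) ++ q0) :: done := by
            simp [pvMergeStep, he]
          rw [hms]
          have hih := ih (cur ++ ['$']) done
          rw [hq, List.tail_cons, List.headI_cons, pvEndswith_concat] at hih
          rw [hih]
          have hseg : pvSegs true ('$' :: cs) = List.modifyHead (List.cons '$') (pvSegs false cs) := by
            simp [pvSegs]
          rw [he, hseg]
          cases hs : pvSegs false cs with
          | nil => exact absurd hs (pvSegs_ne_nil _ _)
          | cons p ps => simp [hs, List.modifyHead]
        · -- real split: start a new segment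
          rw [Bool.not_eq_true] at he
          have hms : pvMergeStep (cur :: done) q0 = q0 :: cur :: done := by
            simp [pvMergeStep, he]
          rw [hms]
          have hih := ih [] (cur :: done)
          rw [hq, List.tail_cons, List.headI_cons, pvEndswith_nil] at hih
          simp only [List.nil_append] at hih
          rw [hih]
          have hseg : pvSegs false ('$' :: cs) = [] :: pvSegs false cs := by
            simp [pvSegs]
          rw [he, hseg]
          cases hs : pvSegs false cs with
          | nil => exact absurd hs (pvSegs_ne_nil _ _)
          | cons p ps => simp [List.modifyHead]
      · rw [pvSplitOn_cons_neg hc, hq]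
        simp only [List.modifyHead, List.tail_cons, List.headI_cons]
        have hih := ih (cur ++ [c]) done
        rw [hq, List.tail_cons, List.headI_cons, pvEndswith_concat] at hih
        have hcur : cur ++ c :: q0 = (cur ++ [c]) ++ q0 := by simp
        rw [hcur, hih]
        simp only [pvSegs]
        rw [if_neg (by simp [hc])]
        cases hs : pvSegs (c == '\\') cs with
        | nil => exact absurd hs (pvSegs_ne_nil _ _)
        | cons p ps => simp [List.modifyHead]

-- the previous-char test of A, read off the processed prefix
theorem pvPrev (s : String) (pre cs : List Char) (h : s.toList = pre ++ cs) :
    ((pre.length : Int) - 1 < 0 ∨ PySem.Str.pyGet? s ((pre.length : Int) - 1) ≠ some '\\')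
      ↔ PySem.Chars.endswith pre ['\\'] = false := by
  rcases List.eq_nil_or_concat pre with hp | ⟨q, x, hp⟩
  · subst hp
    simp [pvEndswith_nil]
  · subst hp
    simp only [List.concat_eq_append] at h ⊢
    have hl : ((q ++ [x]).length : Int) - 1 = ((q.length : Nat) : Int) := by simp
    rw [hl, PySem.Str.pyGet?_natCast, h]
    have : (q ++ [x] ++ cs)[q.length]? = some x := by
      rw [List.append_assoc, List.getElem?_append_right (le_refl _)]
      simp
    rw [this, pvEndswith_concat]
    constructor
    · intro hor
      rcases hor with hlt | hne
      · omega
      · simp only [ne_eq, Option.some_inj] at hne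
        simp [hne]
    · intro hb
      right
      simp only [beq_eq_false_iff_ne, ne_eq] at hb
      simp [hb]

theorem pvFoldA (s : String) (cs : List Char) : ∀ (pre ret : List Char) (ign : Bool),
    s.toList = pre ++ cs →
    ((PySem.List.enumerate cs (pre.length : Int)).foldl (pvStepA s) (ret, ign)).1
      = ret ++ pvGoA (PySem.Chars.endswith pre ['\\']) ign cs := by
  induction cs with
  | nil => intro pre ret ign _; simp [PySem.List.enumerate_nil, pvGoA]
  | cons c cs ih =>
    intro pre ret ign h
    rw [PySem.List.enumerate_cons, List.foldl_cons]
    have hpre' : s.toList = (pre ++ [c]) ++ cs := by simpa using h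
    have hlen : (pre.length : Int) + 1 = ((pre ++ [c]).length : Int) := by simp
    by_cases hc : c = '$'
    · by_cases he : PySem.Chars.endswith pre ['\\'] = false
      · -- unescaped '$': toggle
        have hcond := (pvPrev s pre (c :: cs) h).mpr he
        have hstep : pvStepA s (ret, ign) ((pre.length : Int), c) = (ret, !ign) := by
          simp only [pvStepA]
          rw [if_pos hc, if_pos hcond]
        rw [hstep, hlen]
        rw [ih (pre ++ [c]) ret (!ign) hpre']
        rw [pvEndswith_concat]
        have hb : (c == '\\') = false := by subst hc; decide
        rw [hb]
        simp [pvGoA, hc, he]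
      · -- escaped '$': ordinary character
        rw [Bool.not_eq_false] at he
        have hcond : ¬ ((pre.length : Int) - 1 < 0 ∨ PySem.Str.pyGet? s ((pre.length : Int) - 1) ≠ some '\\') := by
          intro hor
          have := (pvPrev s pre (c :: cs) h).mp hor
          simp [he] at this
        have hb : (c == '\\') = false := by subst hc; decide
        cases ign with
        | false =>
          have hstep : pvStepA s (ret, false) ((pre.length : Int), c) = (ret ++ [c], false) := by
            simp only [pvStepA]
            rw [if_pos hc, if_neg hcond]
            rfl
          rw [hstep, hlen, ih (pre ++ [c]) (ret ++ [c]) false hpre', pvEndswith_concat, hb]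
          simp [pvGoA, hc, he]
        | true =>
          have hstep : pvStepA s (ret, true) ((pre.length : Int), c) = (ret, true) := by
            simp only [pvStepA]
            rw [if_pos hc, if_neg hcond]
            rfl
          rw [hstep, hlen, ih (pre ++ [c]) ret true hpre', pvEndswith_concat, hb]
          simp [pvGoA, hc, he]
    · -- ordinary character
      cases ign with
      | false =>
        have hstep : pvStepA s (ret, false) ((pre.length : Int), c) = (ret ++ [c], false) := by
          simp only [pvStepA]
          rw [if_neg hc]
          rfl
        rw [hstep, hlen, ih (pre ++ [c]) (ret ++ [c]) false hpre', pvEndswith_concat]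
        simp [pvGoA, hc]
      | true =>
        have hstep : pvStepA s (ret, true) ((pre.length : Int), c) = (ret, true) := by
          simp only [pvStepA]
          rw [if_neg hc]
          rfl
        rw [hstep, hlen, ih (pre ++ [c]) ret true hpre', pvEndswith_concat]
        simp [pvGoA, hc]

theorem pvA_eq (s : String) : ignore_hw s = String.ofList (pvGoA false false s.toList) := by
  unfold ignore_hw
  have := pvFoldA s s.toList [] [] false (by simp)
  simp only [List.length_nil, Nat.cast_zero, pvEndswith_nil, List.nil_append] at this
  rw [this]

theorem pvB_eq (s : String) :
    ignore_hw_alt s = String.ofList (PySem.Chars.join [] (pvEvens (pvSegs false s.toList))) := by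
  unfold ignore_hw_alt
  cases hq : List.splitOn '$' s.toList with
  | nil => exact absurd hq (by unfold List.splitOn; exact List.splitOnP_ne_nil _ _)
  | cons p0 rest =>
    simp only []
    have := pvMain s.toList [] []
    rw [hq, List.tail_cons, List.headI_cons, pvEndswith_nil] at this
    simp only [List.nil_append, List.append_nil] at this
    rw [this]
    cases hs : pvSegs false s.toList with
    | nil => exact absurd hs (pvSegs_ne_nil _ _)
    | cons p ps => simp [List.modifyHead]

-- ===== VERDICT (by name: the statement is the Claim_ definition above) =====
theorem ignore_hw_spec : Claim_equal_ignore_hw := by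
  intro s _
  unfold Spec_ignore_hw
  rw [pvA_eq, pvB_eq, pvSel_evens, pvGoA_sel]
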